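-- pv_equiv track=rewrite | github.com/keyonvafa/world-model-evaluation | utils.py | get_state_sequence
-- ===== SOURCE A (Python) =====
-- def get_state_sequence(sequence_str, node_and_direction_to_neighbor):
--   split_seq = sequence_str.split(" ")
--   start_state = int(split_seq[0])
--   moves = split_seq[2:]
--   current_state = start_state
--   state_seq = [current_state]
--   for move in moves:
--     if move != 'end':
--       current_state = node_and_direction_to_neighbor[(current_state, move)]
--       state_seq.append(current_state)
--   return state_seq
-- ===== SOURCE B (Python) =====
-- def get_state_sequence(sequence_str, node_and_direction_to_neighbor):
--   split_seq = sequence_str.split(" ")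
--   def walk(state, ms):
--     if not ms:
--       return [state]
--     if len(ms) == 1:
--       m = ms[0]
--       if m == 'end':
--         return [state]
--       return [state, node_and_direction_to_neighbor[(state, m)]]
--     mid = len(ms) // 2
--     left = walk(state, ms[:mid])
--     right = walk(left[-1], ms[mid:])
--     return left + right[1:]
--   return walk(int(split_seq[0]), split_seq[2:])
-- ===== Notes on version B (the rewrite author's own statement) =====
-- stated objective: alternative
-- what changed: B replaces A's single left-to-right loop with a running state by a divide-and-conquer recursion: it splits the move list in half, recursively computes the state path of each half (the right half seeded with the last state of the left path) and stitches the two paths together.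
import Mathlib
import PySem

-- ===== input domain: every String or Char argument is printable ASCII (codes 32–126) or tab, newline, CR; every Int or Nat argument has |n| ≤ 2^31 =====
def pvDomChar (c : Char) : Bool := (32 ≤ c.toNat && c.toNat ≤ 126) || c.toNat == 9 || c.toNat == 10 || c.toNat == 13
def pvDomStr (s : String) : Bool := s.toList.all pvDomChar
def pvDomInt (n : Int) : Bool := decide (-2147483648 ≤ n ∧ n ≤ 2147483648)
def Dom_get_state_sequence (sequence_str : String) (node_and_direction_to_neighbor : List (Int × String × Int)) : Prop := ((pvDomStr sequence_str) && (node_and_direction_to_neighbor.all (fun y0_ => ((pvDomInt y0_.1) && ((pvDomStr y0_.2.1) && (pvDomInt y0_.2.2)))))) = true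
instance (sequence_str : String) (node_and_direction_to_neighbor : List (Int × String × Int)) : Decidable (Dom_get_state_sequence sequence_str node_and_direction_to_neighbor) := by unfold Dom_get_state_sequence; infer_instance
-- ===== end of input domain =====

-- B walks the moves by divide-and-conquer (split in half, stitch the two state paths)
-- instead of A's left-to-right loop with a running state (objective: alternative).


-- ===== PORT A =====
-- the Python dict {(state, move): next} as a PySem.Dict keyed by the pair (shared by both ports)
def pvLookup (nd : List (Int × String × Int)) (s : Int) (m : String) : Option Int :=
  (PySem.Dict.ofList (nd.map (fun e => ((e.1, e.2.1), e.2.2)))).get? (s, m)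

-- one iteration of A's for-loop; the Option state models the KeyError of a failed lookup
def pvStepA (nd : List (Int × String × Int)) (st : Option (Int × List Int)) (move : String) :
    Option (Int × List Int) :=
  match st with
  | none => none
  | some (cur, acc) =>
    if move ≠ "end" then
      match pvLookup nd cur move with
      | none => none                                   -- KeyError (excluded by Pre_)
      | some nxt => some (nxt, acc ++ [nxt])
    else some (cur, acc)

def get_state_sequence (sequence_str : String) (node_and_direction_to_neighbor : List (Int × String × Int)) : List Int :=
  let split_seq := (PySem.Str.split? sequence_str " ").getD []   -- sep ≠ "", so split? is always some
  match PySem.Int.ofStr? (split_seq.headD "") with               -- split_seq is never empty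
  | none => []                                                   -- int() ValueError (excluded by Pre_)
  | some start_state =>
    let moves := PySem.List.slice split_seq (some 2) none
    match moves.foldl (pvStepA node_and_direction_to_neighbor) (some (start_state, [start_state])) with
    | some (_, acc) => acc
    | none => []                                                 -- KeyError (excluded by Pre_)

-- ===== PORT B =====
-- B's divide-and-conquer walk; none models the KeyError of a failed lookup
def pvWalkB (nd : List (Int × String × Int)) (s : Int) (ms : List String) : Option (List Int) :=
  match hms : ms with
  | [] => some [s]
  | [m] =>
    if m = "end" then some [s]
    else (pvLookup nd s m).map (fun n => [s, n])
  | _ :: _ :: _ =>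
    let mid := ms.length / 2   -- Nat division of a length: exact for Python's '//' on nonnegative ints
    match pvWalkB nd s (ms.take mid) with
    | none => none
    | some left =>
      match pvWalkB nd (left.getLastD s) (ms.drop mid) with
      | none => none
      | some right => some (left ++ right.tail)
  termination_by ms.length
  decreasing_by
    · simp_all [List.length_take]; omega
    · simp_all [List.length_drop]; omega

def get_state_sequence_alt (sequence_str : String) (node_and_direction_to_neighbor : List (Int × String × Int)) : List Int :=
  let toks := (PySem.Str.split? sequence_str " ").getD []
  match PySem.Int.ofStr? (toks.headD "") with
  | none => []                                                   -- int() ValueError (excluded by Pre_)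
  | some start =>
    match pvWalkB node_and_direction_to_neighbor start (PySem.List.slice toks (some 2) none) with
    | some out => out
    | none => []                                                 -- KeyError (excluded by Pre_)

-- ===== PRECONDITION & SPEC =====
-- the exact KeyError condition: every lookup taken along the followed path succeeds
def pvPathOk (nd : List (Int × String × Int)) (s : Int) : List String → Bool
  | [] => true
  | m :: rest =>
    if m = "end" then pvPathOk nd s rest
    else
      match pvLookup nd s m with
      | none => false
      | some n => pvPathOk nd n rest

-- Pre_ excludes exactly the inputs on which the Python A raises — int() ValueError on the
-- first token, or KeyError on a missing (state, move) key along the followed path; it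
-- excludes no input on which A returns a value.
def Pre_get_state_sequence (sequence_str : String) (node_and_direction_to_neighbor : List (Int × String × Int)) : Prop :=
  let toks := (PySem.Str.split? sequence_str " ").getD []
  (PySem.Int.ofStr? (toks.headD "")).isSome = true ∧
  pvPathOk node_and_direction_to_neighbor ((PySem.Int.ofStr? (toks.headD "")).getD 0)
    (PySem.List.slice toks (some 2) none) = true
instance (sequence_str : String) (node_and_direction_to_neighbor : List (Int × String × Int)) : Decidable (Pre_get_state_sequence sequence_str node_and_direction_to_neighbor) := by unfold Pre_get_state_sequence; infer_instance

def pvWitness_get_state_sequence : String × (List (Int × String × Int)) :=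
  ("0 : N end N", [(0, "N", 1), (1, "N", 0)])

def Spec_get_state_sequence (sequence_str : String) (node_and_direction_to_neighbor : List (Int × String × Int)) (out : List Int) : Prop := out = get_state_sequence_alt sequence_str node_and_direction_to_neighbor
instance (sequence_str : String) (node_and_direction_to_neighbor : List (Int × String × Int)) (out : List Int) : Decidable (Spec_get_state_sequence sequence_str node_and_direction_to_neighbor out) := by unfold Spec_get_state_sequence; infer_instance

-- ===== CLAIM (what is proved, stated in full; the proofs are below) =====
def Claim_equal_get_state_sequence : Prop := ∀ (sequence_str : String) (node_and_direction_to_neighbor : List (Int × String × Int)), Dom_get_state_sequence sequence_str node_and_direction_to_neighbor → Pre_get_state_sequence sequence_str node_and_direction_to_neighbor → Spec_get_state_sequence sequence_str node_and_direction_to_neighbor (get_state_sequence sequence_str node_and_direction_to_neighbor)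

-- ===== LEMMAS AND PROOFS =====

-- the linear walk both programs compute: the state sequence, none on a failed lookup
def walkL (nd : List (Int × String × Int)) (s : Int) : List String → Option (List Int)
  | [] => some [s]
  | m :: rest =>
    if m = "end" then walkL nd s rest
    else
      match pvLookup nd s m with
      | none => none
      | some n => (walkL nd n rest).map (s :: ·)

theorem walkL_shape (nd : List (Int × String × Int)) (ms : List String) (s : Int) (l : List Int)
    (h : walkL nd s ms = some l) : ∃ t, l = s :: t := by
  induction ms generalizing s l with
  | nil => exact ⟨[], by simpa [walkL] using h.symm⟩
  | cons m rest ih =>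
    simp only [walkL] at h
    by_cases hm : m = "end"
    · rw [if_pos hm] at h; exact ih s l h
    · rw [if_neg hm] at h
      cases hl : pvLookup nd s m with
      | none => rw [hl] at h; cases h
      | some n =>
        simp only [hl] at h
        obtain ⟨t, _, ht⟩ := Option.map_eq_some_iff.mp h
        exact ⟨t, ht.symm⟩

theorem walkL_append (nd : List (Int × String × Int)) (xs ys : List String) :
    ∀ s : Int, walkL nd s (xs ++ ys) =
      match walkL nd s xs with
      | none => none
      | some l => (walkL nd (l.getLastD s) ys).map (fun r => l ++ r.tail) := by
  induction xs with
  | nil =>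
    intro s
    simp only [List.nil_append, walkL]
    cases hy : walkL nd s ys with
    | none => simp [hy]
    | some r =>
      obtain ⟨t, rfl⟩ := walkL_shape nd ys s r hy
      simp [hy]
  | cons m xs' ih =>
    intro s
    simp only [List.cons_append, walkL]
    by_cases hm : m = "end"
    · simp only [if_pos hm]; exact ih s
    · simp only [if_neg hm]
      cases hl : pvLookup nd s m with
      | none => simp
      | some n =>
        dsimp only
        rw [ih n]
        cases hx : walkL nd n xs' with
        | none => simp
        | some l =>
          obtain ⟨t, rfl⟩ := walkL_shape nd xs' n l hx
          simp only [Option.map_some]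
          have hg : (s :: n :: t).getLastD s = (n :: t).getLastD n := by
            rw [List.getLastD_cons, List.getLastD_cons, List.getLastD_cons]
          rw [hg]
          cases walkL nd ((n :: t).getLastD n) ys <;> simp

theorem pvWalkB_eq_walkL (nd : List (Int × String × Int)) (ms : List String) :
    ∀ s : Int, pvWalkB nd s ms = walkL nd s ms := by
  induction hn : ms.length using Nat.strong_induction_on generalizing ms with
  | _ n ih =>
    intro s
    match ms with
    | [] => simp [pvWalkB, walkL]
    | [m] =>
      simp only [pvWalkB, walkL]
      by_cases hm : m = "end"
      · simp [hm]
      · cases hl : pvLookup nd s m <;> simp [hm]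
    | m1 :: m2 :: rest =>
      rw [pvWalkB]
      have hlen : (m1 :: m2 :: rest).length = n := hn
      set L := m1 :: m2 :: rest with hL
      have h2 : 2 ≤ L.length := by rw [hL]; simp
      have htl : (L.take (L.length / 2)).length < n := by
        rw [← hlen]; simp [List.length_take]; omega
      have hdl : (L.drop (L.length / 2)).length < n := by
        rw [← hlen]; simp [List.length_drop]; omega
      conv_rhs => rw [← List.take_append_drop (L.length / 2) L]
      rw [walkL_append]
      rw [ih _ htl _ rfl s]
      cases hx : walkL nd s (L.take (L.length / 2)) with
      | none => simp
      | some left =>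
        dsimp only
        rw [ih _ hdl _ rfl (left.getLastD s)]
        cases hy : walkL nd (left.getLastD s) (L.drop (L.length / 2)) <;> simp

theorem foldlA_none (nd : List (Int × String × Int)) (ms : List String) :
    ms.foldl (pvStepA nd) none = none := by
  induction ms with
  | nil => rfl
  | cons m rest ih => simpa [pvStepA] using ih

theorem foldlA_walkL (nd : List (Int × String × Int)) (ms : List String) :
    ∀ (c : Int) (acc : List Int),
    ms.foldl (pvStepA nd) (some (c, acc)) =
      match walkL nd c ms with
      | none => none
      | some l => some (l.getLastD c, acc ++ l.tail) := by
  induction ms with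
  | nil => intro c acc; simp [walkL]
  | cons m rest ih =>
    intro c acc
    simp only [List.foldl_cons, pvStepA, walkL]
    by_cases hm : m = "end"
    · simp only [hm, ne_eq, not_true_eq_false, if_false, if_true]
      exact ih c acc
    · simp only [ne_eq, hm, not_false_eq_true, if_true, if_false]
      cases hl : pvLookup nd c m with
      | none => simp [foldlA_none]
      | some n =>
        rw [ih n (acc ++ [n])]
        cases hs : walkL nd n rest with
        | none => simp [hs]
        | some l =>
          obtain ⟨t, rfl⟩ := walkL_shape nd rest n l hs
          simp only [hs, Option.map_some, List.getLastD_cons, List.tail_cons]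
          simp [List.append_assoc]

-- ===== VERDICT (by name: the statement is the Claim_ definition above) =====
theorem get_state_sequence_spec : Claim_equal_get_state_sequence := by
  intro s nd _ _
  unfold Spec_get_state_sequence
  cases hp : PySem.Int.ofStr? (((PySem.Str.split? s " ").getD []).head?.getD "") with
  | none => simp [get_state_sequence, get_state_sequence_alt, hp]
  | some st =>
    simp only [get_state_sequence, get_state_sequence_alt, List.headD_eq_head?_getD, hp]
    rw [foldlA_walkL, pvWalkB_eq_walkL]
    cases hs : walkL nd st (PySem.List.slice ((PySem.Str.split? s " ").getD []) (some 2) none) with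
    | none => rfl
    | some l =>
      obtain ⟨t, rfl⟩ := walkL_shape nd _ _ _ hs
      simp
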